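-- pv_equiv track=rewrite | github.com/fds-git/GeekBrains | SOD/SOD_homework_6_2_scrapy_avito/avitoparser/items.py | cleaner_params
-- ===== SOURCE A (Python) =====
-- def cleaner_params(values):
--     result = dict()
--     previous = ''
--     for val in values:
--         if val == ' ':
--             previous = ' '
--             continue
--         elif previous == ' ':
--             previous = val
--             continue
--         else:
--             result[previous] = val
--     return result
-- ===== SOURCE B (Python) =====
-- def cleaner_params(values):
--     # Split into runs of consecutive non-space tokens (keeping empty runs),
--     # then map each run: first run yields result[''] = run[-1] when non-empty,
--     # later runs yield result[run[0]] = run[-1] when they have >= 2 tokens.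
--     runs = []
--     cur = []
--     for val in values:
--         if val == ' ':
--             runs.append(cur)
--             cur = []
--         else:
--             cur.append(val)
--     runs.append(cur)
--     result = {}
--     if runs[0]:
--         result[''] = runs[0][-1]
--     for run in runs[1:]:
--         if len(run) >= 2:
--             result[run[0]] = run[-1]
--     return result
-- ===== Notes on version B (the rewrite author's own statement) =====
-- stated objective: alternative
-- what changed: Replaces A's one-loop three-branch state machine (carrying a 'previous' marker through the scan) by a two-pass split-then-map: first split the input into runs of consecutive non-space tokens (keeping empty runs), then map the first run to the '' key and each later run of length >= 2 to (run[0], run[-1]).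
import Mathlib
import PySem

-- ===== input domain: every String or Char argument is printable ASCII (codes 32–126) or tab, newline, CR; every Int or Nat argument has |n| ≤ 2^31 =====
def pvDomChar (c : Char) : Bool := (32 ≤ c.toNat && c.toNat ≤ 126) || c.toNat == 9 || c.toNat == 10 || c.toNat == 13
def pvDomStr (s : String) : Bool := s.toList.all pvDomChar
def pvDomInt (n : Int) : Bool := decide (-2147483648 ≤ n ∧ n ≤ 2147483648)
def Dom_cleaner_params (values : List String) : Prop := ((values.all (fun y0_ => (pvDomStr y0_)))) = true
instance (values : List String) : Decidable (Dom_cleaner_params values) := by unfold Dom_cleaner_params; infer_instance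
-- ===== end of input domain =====

-- B replaces A's one-loop 'previous'-marker state machine by a two-pass
-- split-into-runs-then-map decomposition (objective: alternative; same O(n) cost).

-- ===== PORT A =====
-- A's single loop, carrying (result, previous) through the scan.
def cleanerLoopA (d : PySem.Dict String String) (previous : String) :
    List String → PySem.Dict String String
  | [] => d
  | val :: vs =>
    if val = " " then cleanerLoopA d " " vs
    else if previous = " " then cleanerLoopA d val vs
    else cleanerLoopA (d.insert previous val) previous vs

def cleaner_params (values : List String) : List (String × String) :=
  (cleanerLoopA PySem.Dict.empty "" values).items

-- ===== PORT B =====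
-- Source B's first loop: split into runs of consecutive non-space tokens, keeping empty runs.
def splitRuns (cur : List String) : List String → List (List String)
  | [] => [cur]
  | val :: vs => if val = " " then cur :: splitRuns [] vs else splitRuns (cur ++ [val]) vs

-- Source B's second loop over runs[1:].
def procRest (d : PySem.Dict String String) : List (List String) → PySem.Dict String String
  | [] => d
  | run :: rest => procRest (if 2 ≤ run.length then d.insert run.head! run.getLast! else d) rest

def cleaner_params_alt (values : List String) : List (String × String) :=
  match splitRuns [] values with
  | [] => []   -- unreachable: splitRuns always returns at least one run
  | first :: rest =>
    (procRest (if first ≠ [] then PySem.Dict.empty.insert "" first.getLast!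
               else PySem.Dict.empty) rest).items

-- ===== PRECONDITION & SPEC =====
def Spec_cleaner_params (values : List String) (out : List (String × String)) : Prop := out = cleaner_params_alt values
instance (values : List String) (out : List (String × String)) : Decidable (Spec_cleaner_params values out) := by unfold Spec_cleaner_params; infer_instance

-- ===== CLAIM (what is proved, stated in full; the proofs are below) =====
def Claim_equal_cleaner_params : Prop := ∀ (values : List String), Dom_cleaner_params values → Spec_cleaner_params values (cleaner_params values)

-- ===== LEMMAS AND PROOFS =====

theorem splitRuns_ne_nil (vs : List String) : ∀ cur, splitRuns cur vs ≠ [] := by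
  induction vs with
  | nil => intro cur; simp [splitRuns]
  | cons v vs ih => intro cur; simp only [splitRuns]; split <;> simp [ih]

theorem splitRuns_shift (vs : List String) : ∀ cur : List String,
    splitRuns cur vs = (splitRuns [] vs).modifyHead (cur ++ ·) := by
  induction vs with
  | nil => intro cur; simp [splitRuns]
  | cons v vs ih =>
    intro cur
    by_cases hv : v = " "
    · simp [splitRuns, hv]
    · simp only [splitRuns, if_neg hv, List.nil_append]
      rw [ih (cur ++ [v]), ih [v]]
      cases splitRuns [] vs with
      | nil => rfl
      | cons h t => simp

theorem getLast!_cons_of_ne_nil {α : Type} [Inhabited α] (a : α) (l : List α) (h : l ≠ []) :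
    (a :: l).getLast! = l.getLast! := by
  cases l with
  | nil => exact absurd rfl h
  | cons b t => simp [List.getLast!, List.getLast]

-- the run-wise characterisation of A's loop, from both of its 'previous' modes
theorem loopA_runs (vs : List String) :
    (∀ d, cleanerLoopA d " " vs = procRest d (splitRuns [] vs)) ∧
    (∀ d k, k ≠ " " → cleanerLoopA d k vs =
      procRest (if (splitRuns [] vs).headI = [] then d
                else d.insert k (splitRuns [] vs).headI.getLast!) ((splitRuns [] vs).tail)) := by
  induction vs with
  | nil => exact ⟨fun d => by simp [cleanerLoopA, splitRuns, procRest],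
                  fun d k _ => by simp [cleanerLoopA, splitRuns, procRest]⟩
  | cons v vs ih =>
    obtain ⟨ih1, ih2⟩ := ih
    by_cases hv : v = " "
    · subst hv
      refine ⟨fun d => ?_, fun d k hk => ?_⟩ <;>
        simp [cleanerLoopA, splitRuns, procRest, ih1 d]
    · have hsplit : splitRuns [] (v :: vs)
          = (v :: (splitRuns [] vs).headI) :: (splitRuns [] vs).tail := by
        simp only [splitRuns, if_neg hv, List.nil_append]
        rw [splitRuns_shift vs [v]]
        cases h : splitRuns [] vs with
        | nil => exact absurd h (splitRuns_ne_nil vs [])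
        | cons h t => simp
      constructor
      · intro d
        have hstep : cleanerLoopA d " " (v :: vs) = cleanerLoopA d v vs := by
          simp [cleanerLoopA, hv]
        rw [hstep, ih2 d v hv, hsplit]
        by_cases hH : (splitRuns [] vs).headI = []
        · simp [procRest, hH]
        · have hlen : 2 ≤ (v :: (splitRuns [] vs).headI).length := by
            have := List.length_pos_of_ne_nil hH; simp; omega
          simp only [procRest, if_pos hlen, List.head!_cons,
            getLast!_cons_of_ne_nil v _ hH, if_neg hH]
      · intro d k hk
        have hstep : cleanerLoopA d k (v :: vs) = cleanerLoopA (d.insert k v) k vs := by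
          simp [cleanerLoopA, hv, hk]
        rw [hstep, ih2 (d.insert k v) k hk, hsplit]
        by_cases hH : (splitRuns [] vs).headI = []
        · simp [hH, List.getLast!]
        · rw [if_neg hH, PySem.Dict.insert_insert_self]
          simp only [List.headI_cons, List.tail_cons, getLast!_cons_of_ne_nil v _ hH]
          rw [if_neg (List.cons_ne_nil v _)]

-- ===== VERDICT (by name: the statement is the Claim_ definition above) =====
theorem cleaner_params_spec : Claim_equal_cleaner_params := by
  intro values _
  unfold Spec_cleaner_params cleaner_params cleaner_params_alt
  have h2 := (loopA_runs values).2 PySem.Dict.empty "" (by decide)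
  rw [h2]
  cases h : splitRuns [] values with
  | nil => exact absurd h (splitRuns_ne_nil values [])
  | cons f r =>
    simp only [List.headI_cons, List.tail_cons]
    by_cases hf : f = [] <;> simp [hf]
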